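-- pv_equiv track=rewrite | github.com/gamblecd/advent-of-code | Day17/answer.py | find_y_velocities
-- ===== SOURCE A (Python) =====
-- def find_y_velocities(x_velocities, target1, target2):
--     max_y = target2[1]
--     min_y = target1[1]
--     y_max = 0
--     possible_velocities = {}
--     discrete_x_velocities =x_velocities[0]
--     likely_velocities = sorted(discrete_x_velocities.items(), key=lambda x: len(x[1]), reverse=True)
--     non_discrete_x_velocities = x_velocities[1]
--     for x_velocity, steps in likely_velocities:
--         # TODO some set of ranges for y
--         for y in range(-max(abs(max_y), abs(min_y)), max(abs(max_y), abs(min_y))):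
--             velocity = y
--             for x_step in steps:
--                 y_loc = sum([velocity-xs for xs in range(0,x_step)])
--                 y_height = sum(
--                     filter(lambda x: x > 0, [velocity-xs for xs in range(0, x_step)]))
--                 if y_loc >= min_y and y_loc <= max_y:
--                     y_max = max(y_max, y_height)
--                     possible_velocities[(x_velocity, y)] = y_height
--
--     for x_velocity, steps in non_discrete_x_velocities.items():
--         # TODO some set of ranges for y
--         for y in range(-max(abs(max_y), abs(min_y)), max(abs(max_y), abs(min_y))):
--             velocity = y
--             initial_step = steps[0]
--             y_loc = max_y
--             while y_loc >= min_y: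
--                 y_loc = sum([velocity-xs for xs in range(0, initial_step)])
--                 y_height = sum(
--                     filter(lambda x: x > 0, [velocity-xs for xs in range(0, initial_step)]))
--                 if y_loc >= min_y and y_loc <= max_y:
--                     y_max = max(y_max, y_height)
--                     possible_velocities[(x_velocity, y)] = y_height
--                 initial_step += 1
--
--     return y_max, len(possible_velocities.keys())
-- ===== SOURCE B (Python) =====
-- def _y_loc(v, n):
--     # position after n steps with initial y-velocity v (triangular closed form)
--     return v * n - n * (n - 1) // 2 if n > 0 else 0
--
--
-- def _y_height(v, n):
--     # sum of the positive deltas v, v-1, ... within the first n steps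
--     if v <= 0 or n <= 0:
--         return 0
--     c = min(n, v)
--     return (v + (v - c + 1)) * c // 2
--
--
-- def _hit_steps(y, n0, min_y, max_y):
--     # step counts n >= n0 whose closed-form position lands in the target band,
--     # scanning exactly as long as the position has not dropped below min_y
--     if max_y < min_y:
--         return []  # empty band: nothing can hit
--     out = []
--     n = n0
--     while True:
--         loc = _y_loc(y, n)
--         if min_y <= loc <= max_y:
--             out.append(n)
--         if loc < min_y:
--             return out
--         n += 1
--
--
-- def find_y_velocities(x_velocities, target1, target2):
--     min_y = target1[1]
--     max_y = target2[1]
--     bound = max(abs(max_y), abs(min_y))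
--     discrete, non_discrete = x_velocities
--     events = [(xv, y, n)
--               for xv, steps in discrete.items()
--               for y in range(-bound, bound)
--               for n in steps
--               if min_y <= _y_loc(y, n) <= max_y]
--     events += [(xv, y, n)
--                for xv, steps in non_discrete.items()
--                for y in range(-bound, bound)
--                for n in _hit_steps(y, steps[0], min_y, max_y)]
--     y_max = max([0] + [_y_height(y, n) for _, y, n in events])
--     return y_max, len({(xv, y) for xv, y, _ in events})
-- ===== Notes on version B (the rewrite author's own statement) =====
-- stated objective: faster
-- what changed: B replaces A's stateful nested loops (per-step list-building sum loops, dict of heights, running max) by closed-form triangular-number formulas and a staged pipeline: it first generates the flat list of hit events by comprehensions, then takes the max height and the size of the set of hit (x,y) pairs; the sort of the discrete x velocities is dropped since the result does not depend on iteration order.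
import Mathlib
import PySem

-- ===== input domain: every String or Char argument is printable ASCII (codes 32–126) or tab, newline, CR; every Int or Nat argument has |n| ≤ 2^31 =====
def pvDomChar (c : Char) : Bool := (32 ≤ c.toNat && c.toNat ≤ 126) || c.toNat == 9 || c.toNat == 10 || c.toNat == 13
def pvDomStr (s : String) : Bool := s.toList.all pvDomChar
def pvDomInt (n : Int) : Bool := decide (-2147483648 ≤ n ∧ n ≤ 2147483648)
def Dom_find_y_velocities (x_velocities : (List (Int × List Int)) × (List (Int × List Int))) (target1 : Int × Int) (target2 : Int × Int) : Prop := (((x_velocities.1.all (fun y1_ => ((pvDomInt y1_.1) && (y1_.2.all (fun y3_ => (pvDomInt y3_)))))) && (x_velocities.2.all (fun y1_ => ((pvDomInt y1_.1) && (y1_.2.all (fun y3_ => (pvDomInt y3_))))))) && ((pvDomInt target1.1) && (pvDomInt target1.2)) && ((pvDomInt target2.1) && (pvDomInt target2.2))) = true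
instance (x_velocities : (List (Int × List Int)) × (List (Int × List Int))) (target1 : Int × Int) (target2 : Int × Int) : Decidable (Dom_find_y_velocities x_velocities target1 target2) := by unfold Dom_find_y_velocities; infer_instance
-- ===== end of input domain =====

-- B replaces A's stateful nested loops (per-step list-building sum loops, dict of heights,
-- running max) by closed-form triangular-number formulas and a staged pipeline: it first
-- generates the flat list of hit events, then takes the max height and the size of the set
-- of hit (x, y) pairs; the sort of the discrete velocities is dropped, since the result
-- does not depend on the iteration order (objective: faster).
-- The two while loops ('while y_loc >= min_y' in A, 'while True … return' in B's _hit_steps)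
-- are ported with an explicit fuel counter pvFuel, a totality device only: it is large
-- enough for every input either loop is run on.

-- ===== PORT A =====
-- fuel bound for the while loops (shared totality device, not part of either algorithm)
def pvFuel (min_y y n0 : Int) : Nat := 2 * y.natAbs + 2 * min_y.natAbs + n0.natAbs + 8

-- the body of A's innermost loop: y_loc/y_height as literal list-comprehension sums
def pvBodyA (min_y max_y xv y : Int) (s : Int × PySem.Dict (Int × Int) Int) (n : Int) :
    Int × PySem.Dict (Int × Int) Int :=
  let locs := (PySem.List.pyRange 0 n 1).map (fun xs => y - xs)
  let y_loc := locs.sum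
  let y_height := (locs.filter (fun x => decide (0 < x))).sum
  if min_y ≤ y_loc ∧ y_loc ≤ max_y then (max s.1 y_height, s.2.insert (xv, y) y_height) else s

-- A's 'while y_loc >= min_y' loop (second phase); loc is the y_loc of the previous iteration
def pvWhileA (min_y max_y xv y : Int) :
    Nat → Int → Int → Int × PySem.Dict (Int × Int) Int → Int × PySem.Dict (Int × Int) Int
  | 0, _, _, s => s
  | fuel + 1, n, loc, s =>
    if min_y ≤ loc then
      pvWhileA min_y max_y xv y fuel (n + 1)
        (((PySem.List.pyRange 0 n 1).map (fun xs => y - xs)).sum)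
        (pvBodyA min_y max_y xv y s n)
    else s

def find_y_velocities (x_velocities : (List (Int × List Int)) × (List (Int × List Int))) (target1 : Int × Int) (target2 : Int × Int) : Int × Int :=
  let max_y := target2.2
  let min_y := target1.2
  let bound : Int := max |max_y| |min_y|
  let likely := PySem.List.sorted x_velocities.1 (fun x => (x.2.length : Int)) true
  let s1 := likely.foldl (fun s p =>
    (PySem.List.pyRange (-bound) bound 1).foldl (fun s y =>
      p.2.foldl (fun s n => pvBodyA min_y max_y p.1 y s n) s) s) (0, PySem.Dict.empty)
  let s2 := x_velocities.2.foldl (fun s p =>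
    (PySem.List.pyRange (-bound) bound 1).foldl (fun s y =>
      pvWhileA min_y max_y p.1 y (pvFuel min_y y (PySem.List.pyGetD p.2 0 0))
        (PySem.List.pyGetD p.2 0 0) max_y s) s) s1
  (s2.1, ((PySem.Dict.keys s2.2).length : Int))

-- ===== PORT B =====
-- closed-form position after n steps (Source B's _y_loc)
def pvLoc (v n : Int) : Int :=
  if 0 < n then v * n - PySem.Int.floordiv (n * (n - 1)) 2 else 0

-- closed-form sum of the positive deltas (Source B's _y_height)
def pvHeight (v n : Int) : Int :=
  if v ≤ 0 ∨ n ≤ 0 then 0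
  else PySem.Int.floordiv ((v + (v - min n v + 1)) * min n v) 2

-- Source B's _hit_steps scan loop: step counts landing in the band, scanned while loc ≥ min_y
def pvHitStepsGo (min_y max_y y : Int) : Nat → Int → List Int
  | 0, _ => []
  | fuel + 1, n =>
    let loc := pvLoc y n
    (if min_y ≤ loc ∧ loc ≤ max_y then [n] else []) ++
      (if loc < min_y then [] else pvHitStepsGo min_y max_y y fuel (n + 1))

-- Source B's _hit_steps: empty band short-circuit, then the scan
def pvHitSteps (min_y max_y y : Int) (fuel : Nat) (n : Int) : List Int :=
  if max_y < min_y then [] else pvHitStepsGo min_y max_y y fuel n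

-- Source B's 'events' list: all (xv, y, n) hit triples, in comprehension order
def pvEvents (min_y max_y bound : Int)
    (l1 l2 : List (Int × List Int)) : List (Int × Int × Int) :=
  l1.flatMap (fun p =>
    (PySem.List.pyRange (-bound) bound 1).flatMap (fun y =>
      (p.2.filter (fun n => decide (min_y ≤ pvLoc y n ∧ pvLoc y n ≤ max_y))).map
        (fun n => (p.1, y, n)))) ++
  l2.flatMap (fun p =>
    (PySem.List.pyRange (-bound) bound 1).flatMap (fun y =>
      (pvHitSteps min_y max_y y (pvFuel min_y y (PySem.List.pyGetD p.2 0 0))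
          (PySem.List.pyGetD p.2 0 0)).map (fun n => (p.1, y, n))))

def find_y_velocities_alt (x_velocities : (List (Int × List Int)) × (List (Int × List Int))) (target1 : Int × Int) (target2 : Int × Int) : Int × Int :=
  let min_y := target1.2
  let max_y := target2.2
  let bound : Int := max |max_y| |min_y|
  let events := pvEvents min_y max_y bound x_velocities.1 x_velocities.2
  let y_max := (events.map (fun e => pvHeight e.2.1 e.2.2)).foldl max 0
  (y_max, ((PySem.Set.ofList (events.map (fun e => (e.1, e.2.1)))).length : Int))

-- ===== PRECONDITION & SPEC =====
-- Pre_ excludes only inputs where A raises: a non-discrete entry with an empty step list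
-- makes A's 'steps[0]' raise IndexError (B raises there too).
def Pre_find_y_velocities (x_velocities : (List (Int × List Int)) × (List (Int × List Int))) (target1 : Int × Int) (target2 : Int × Int) : Prop :=
  ∀ p ∈ x_velocities.2, p.2 ≠ []
instance (x_velocities : (List (Int × List Int)) × (List (Int × List Int))) (target1 : Int × Int) (target2 : Int × Int) : Decidable (Pre_find_y_velocities x_velocities target1 target2) := by unfold Pre_find_y_velocities; infer_instance
def pvWitness_find_y_velocities : ((List (Int × List Int)) × (List (Int × List Int))) × (Int × Int) × (Int × Int) :=
  (([(6, [1, 2])], [(7, [3])]), (20, -10), (30, -5))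

def Spec_find_y_velocities (x_velocities : (List (Int × List Int)) × (List (Int × List Int))) (target1 : Int × Int) (target2 : Int × Int) (out : Int × Int) : Prop := out = find_y_velocities_alt x_velocities target1 target2
instance (x_velocities : (List (Int × List Int)) × (List (Int × List Int))) (target1 : Int × Int) (target2 : Int × Int) (out : Int × Int) : Decidable (Spec_find_y_velocities x_velocities target1 target2 out) := by unfold Spec_find_y_velocities; infer_instance

-- ===== CLAIM (what is proved, stated in full; the proofs are below) =====
def Claim_equal_find_y_velocities : Prop := ∀ (x_velocities : (List (Int × List Int)) × (List (Int × List Int))) (target1 : Int × Int) (target2 : Int × Int), Dom_find_y_velocities x_velocities target1 target2 → Pre_find_y_velocities x_velocities target1 target2 → Spec_find_y_velocities x_velocities target1 target2 (find_y_velocities x_velocities target1 target2)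

-- ===== LEMMAS AND PROOFS =====

-- closed forms agree with A's list-comprehension sums --------------------------------

theorem pvLoc_sum_nat (y : Int) (k : Nat) :
    ((PySem.List.pyRange 0 (k : Int) 1).map (fun xs => y - xs)).sum = pvLoc y k := by
  induction k with
  | zero => simp [PySem.List.pyRange_one_eq_nil, pvLoc]
  | succ k ih =>
    rw [show ((k + 1 : Nat) : Int) = (k : Int) + 1 by push_cast; ring,
        PySem.List.pyRange_one_succ_right (by positivity)]
    rw [List.map_append, List.sum_append]
    simp only [List.map_cons, List.map_nil, List.sum_cons, List.sum_nil, add_zero]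
    rw [ih]
    rcases Nat.eq_zero_or_pos k with rfl | hkpos
    · simp only [pvLoc, PySem.Int.floordiv_eq_ediv_of_pos (by norm_num : (0:Int) < 2)]
      norm_num
    · simp only [pvLoc, PySem.Int.floordiv_eq_ediv_of_pos (by norm_num : (0:Int) < 2)]
      have hprod : ((k:Int) + 1) * (((k:Int) + 1) - 1) = (k:Int) * ((k:Int) - 1) + (k:Int) * 2 := by
        ring
      rw [hprod, Int.add_mul_ediv_right _ _ (by norm_num : (2:Int) ≠ 0)]
      have hy1 : y * ((k:Int) + 1) = y * (k:Int) + y := by ring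
      split_ifs <;> omega

theorem pvHeight_rec (y : Int) (k : Nat) :
    pvHeight y ((k:Int) + 1) = pvHeight y (k:Int) + (if (k:Int) < y then y - k else 0) := by
  by_cases hy : y ≤ 0
  · have h1 : ¬ ((k:Int) < y) := by omega
    simp [pvHeight, hy, h1]
  · rw [not_le] at hy
    by_cases hk : (k:Int) < y
    · have hmin1 : min (k:Int) y = (k:Int) := by omega
      have hmin2 : min ((k:Int) + 1) y = (k:Int) + 1 := by omega
      simp only [pvHeight, hmin1, hmin2, hk, if_true,
        PySem.Int.floordiv_eq_ediv_of_pos (by norm_num : (0:Int) < 2)]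
      have hprod : (y + (y - ((k:Int) + 1) + 1)) * ((k:Int) + 1)
          = (y + (y - (k:Int) + 1)) * (k:Int) + (y - (k:Int)) * 2 := by ring
      rw [hprod, Int.add_mul_ediv_right _ _ (by norm_num : (2:Int) ≠ 0)]
      rcases Nat.eq_zero_or_pos k with rfl | hkpos
      · norm_num
        omega
      · have hc1 : ¬ (y ≤ 0 ∨ ((k:Int) + 1) ≤ 0) := by omega
        have hc2 : ¬ (y ≤ 0 ∨ (k:Int) ≤ 0) := by omega
        simp only [if_neg hc1, if_neg hc2]
    · have hmin1 : min (k:Int) y = y := by omega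
      have hmin2 : min ((k:Int) + 1) y = y := by omega
      simp only [pvHeight, hmin1, hmin2, hk, if_false]
      have hc1 : ¬ (y ≤ 0 ∨ ((k:Int) + 1) ≤ 0) := by omega
      have hc2 : ¬ (y ≤ 0 ∨ (k:Int) ≤ 0) := by omega
      simp only [if_neg hc1, if_neg hc2]
      omega

theorem pvHeight_sum_nat (y : Int) (k : Nat) :
    (((PySem.List.pyRange 0 (k : Int) 1).map (fun xs => y - xs)).filter
        (fun x => decide (0 < x))).sum = pvHeight y k := by
  induction k with
  | zero => simp [PySem.List.pyRange_one_eq_nil, pvHeight]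
  | succ k ih =>
    rw [show ((k + 1 : Nat) : Int) = (k : Int) + 1 by push_cast; ring,
        PySem.List.pyRange_one_succ_right (by positivity)]
    rw [List.map_append, List.filter_append, List.sum_append]
    simp only [List.map_cons, List.map_nil]
    rw [ih, pvHeight_rec]
    by_cases hk : (k:Int) < y
    · simp [List.filter, hk]
    · simp [List.filter, hk]

theorem pvLoc_sum (y n : Int) :
    ((PySem.List.pyRange 0 n 1).map (fun xs => y - xs)).sum = pvLoc y n := by
  by_cases h : n ≤ 0
  · rw [PySem.List.pyRange_one_eq_nil h]; simp [pvLoc]; omega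
  · have hn : n = (n.toNat : Int) := by omega
    rw [hn]; exact pvLoc_sum_nat y n.toNat

theorem pvHeight_sum (y n : Int) :
    (((PySem.List.pyRange 0 n 1).map (fun xs => y - xs)).filter (fun x => decide (0 < x))).sum
      = pvHeight y n := by
  by_cases h : n ≤ 0
  · rw [PySem.List.pyRange_one_eq_nil h]; simp [pvHeight]; omega
  · have hn : n = (n.toNat : Int) := by omega
    rw [hn]; exact pvHeight_sum_nat y n.toNat

-- proof-side stateful mirror of the event stream (B's pipeline folded step by step) ----

def pvUpd (s : Int × PySem.Set (Int × Int)) (e : Int × Int × Int) :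
    Int × PySem.Set (Int × Int) :=
  (max s.1 (pvHeight e.2.1 e.2.2), PySem.Set.add s.2 (e.1, e.2.1))

def pvBodyB (min_y max_y xv y : Int) (s : Int × PySem.Set (Int × Int)) (n : Int) :
    Int × PySem.Set (Int × Int) :=
  let loc := pvLoc y n
  if min_y ≤ loc ∧ loc ≤ max_y then (max s.1 (pvHeight y n), PySem.Set.add s.2 (xv, y)) else s

def pvWhileB (min_y max_y xv y : Int) :
    Nat → Int → Int → Int × PySem.Set (Int × Int) → Int × PySem.Set (Int × Int)
  | 0, _, _, s => s
  | fuel + 1, n, loc, s =>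
    if min_y ≤ loc then
      pvWhileB min_y max_y xv y fuel (n + 1) (pvLoc y n) (pvBodyB min_y max_y xv y s n)
    else s

-- the simulation relation between A's (y_max, dict) state and the (y_max, set) state --

def pvRel (s : Int × PySem.Dict (Int × Int) Int) (t : Int × PySem.Set (Int × Int)) : Prop :=
  s.1 = t.1 ∧ (∀ k, k ∈ s.2.keys ↔ k ∈ t.2) ∧ s.2.keys.Nodup ∧ t.2.Nodup

theorem pvRel_body (min_y max_y xv y n : Int) (s t) (h : pvRel s t) :
    pvRel (pvBodyA min_y max_y xv y s n) (pvBodyB min_y max_y xv y t n) := by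
  obtain ⟨h1, h2, h3, h4⟩ := h
  simp only [pvBodyA, pvBodyB, pvLoc_sum, pvHeight_sum]
  split_ifs with hc
  · refine ⟨by simp [h1], fun k => ?_, ?_, PySem.Set.nodup_add _ _ h4⟩
    · simp only [PySem.Dict.mem_keys_insert, PySem.Set.mem_add, h2 k]
      tauto
    · exact PySem.Dict.nodup_keys_insert _ _ _ h3
  · exact ⟨h1, h2, h3, h4⟩

theorem pvRel_while (min_y max_y xv y : Int) (fuel : Nat) :
    ∀ (n loc : Int) (s t), pvRel s t →
      pvRel (pvWhileA min_y max_y xv y fuel n loc s) (pvWhileB min_y max_y xv y fuel n loc t) := by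
  induction fuel with
  | zero => intro n loc s t h; exact h
  | succ f ih =>
    intro n loc s t h
    simp only [pvWhileA, pvWhileB, pvLoc_sum]
    split_ifs with hc
    · exact ih _ _ _ _ (pvRel_body min_y max_y xv y n s t h)
    · exact h

theorem pvRel_foldl {α β γ : Type} (R : β → γ → Prop) (f : β → α → β) (g : γ → α → γ)
    (h : ∀ s t x, R s t → R (f s x) (g t x)) :
    ∀ (l : List α) (s : β) (t : γ), R s t → R (l.foldl f s) (l.foldl g t)
  | [], _, _, hst => hst
  | x :: l, s, t, hst => pvRel_foldl R f g h l _ _ (h s t x hst)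

-- the stateful mirror equals a pvUpd-fold over the event stream -----------------------

theorem pvInnerB_eq (min_y max_y xv y : Int) (steps : List Int) (s) :
    steps.foldl (fun s n => pvBodyB min_y max_y xv y s n) s
      = ((steps.filter (fun n => decide (min_y ≤ pvLoc y n ∧ pvLoc y n ≤ max_y))).map
          (fun n => (xv, y, n))).foldl pvUpd s := by
  rw [List.foldl_map, ← PySem.List.foldl_ite_eq_foldl_filter]
  apply PySem.List.foldl_congr_mem
  intro s n _
  simp only [pvBodyB, pvUpd]

theorem pvWhileB_eq (min_y max_y xv y : Int) (fuel : Nat) :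
    ∀ (n loc : Int) (s),
      pvWhileB min_y max_y xv y fuel n loc s
        = if min_y ≤ loc then
            ((pvHitStepsGo min_y max_y y fuel n).map (fun k => (xv, y, k))).foldl pvUpd s
          else s := by
  induction fuel with
  | zero =>
    intro n loc s
    simp [pvWhileB, pvHitStepsGo]
  | succ f ih =>
    intro n loc s
    by_cases hc : min_y ≤ loc
    · simp only [pvWhileB, pvHitStepsGo, if_pos hc]
      rw [ih, List.map_append, List.foldl_append]
      have hfirst : ((if min_y ≤ pvLoc y n ∧ pvLoc y n ≤ max_y then [n] else []).map
            (fun k => ((xv : Int), (y : Int), k))).foldl pvUpd s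
          = pvBodyB min_y max_y xv y s n := by
        by_cases hin : min_y ≤ pvLoc y n ∧ pvLoc y n ≤ max_y
        · simp [hin, pvBodyB, pvUpd]
        · simp [hin, pvBodyB]
      rw [hfirst]
      by_cases hlt : pvLoc y n < min_y
      · rw [if_neg (by omega : ¬ min_y ≤ pvLoc y n), if_pos hlt]
        simp
      · rw [if_pos (by omega : min_y ≤ pvLoc y n), if_neg hlt]
    · simp only [pvWhileB, if_neg hc]

theorem pvWhileB_events (min_y max_y xv y : Int) (fuel : Nat) (n : Int) (s) :
    pvWhileB min_y max_y xv y fuel n max_y s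
      = ((pvHitSteps min_y max_y y fuel n).map (fun k => (xv, y, k))).foldl pvUpd s := by
  rw [pvWhileB_eq]
  unfold pvHitSteps
  by_cases hb : max_y < min_y
  · rw [if_neg (by omega : ¬ min_y ≤ max_y), if_pos hb]
    rfl
  · rw [if_pos (by omega : min_y ≤ max_y), if_neg hb]

theorem pvItemB_eq (min_y max_y bound : Int) (p : Int × List Int) (s) :
    (PySem.List.pyRange (-bound) bound 1).foldl (fun s y =>
        p.2.foldl (fun s n => pvBodyB min_y max_y p.1 y s n) s) s
      = ((PySem.List.pyRange (-bound) bound 1).flatMap (fun y =>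
          (p.2.filter (fun n => decide (min_y ≤ pvLoc y n ∧ pvLoc y n ≤ max_y))).map
            (fun n => (p.1, y, n)))).foldl pvUpd s := by
  rw [List.foldl_flatMap]
  apply PySem.List.foldl_congr_mem
  intro s y _
  exact pvInnerB_eq min_y max_y p.1 y p.2 s

theorem pvItemB_while_eq (min_y max_y bound : Int) (p : Int × List Int) (s) :
    (PySem.List.pyRange (-bound) bound 1).foldl (fun s y =>
        pvWhileB min_y max_y p.1 y (pvFuel min_y y (PySem.List.pyGetD p.2 0 0))
          (PySem.List.pyGetD p.2 0 0) max_y s) s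
      = ((PySem.List.pyRange (-bound) bound 1).flatMap (fun y =>
          (pvHitSteps min_y max_y y (pvFuel min_y y (PySem.List.pyGetD p.2 0 0))
              (PySem.List.pyGetD p.2 0 0)).map (fun n => (p.1, y, n)))).foldl pvUpd s := by
  rw [List.foldl_flatMap]
  apply PySem.List.foldl_congr_mem
  intro s y _
  exact pvWhileB_events min_y max_y p.1 y _ _ s

-- the full stateful mirror, both phases, as one pvUpd-fold over pvEvents (sorted order)
theorem pvStateful_eq (min_y max_y bound : Int) (l1 l2 : List (Int × List Int)) (s) :
    l2.foldl (fun s p => (PySem.List.pyRange (-bound) bound 1).foldl (fun s y =>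
        pvWhileB min_y max_y p.1 y (pvFuel min_y y (PySem.List.pyGetD p.2 0 0))
          (PySem.List.pyGetD p.2 0 0) max_y s) s)
      (l1.foldl (fun s p => (PySem.List.pyRange (-bound) bound 1).foldl (fun s y =>
        p.2.foldl (fun s n => pvBodyB min_y max_y p.1 y s n) s) s) s)
      = (pvEvents min_y max_y bound l1 l2).foldl pvUpd s := by
  unfold pvEvents
  rw [List.foldl_append, List.foldl_flatMap, List.foldl_flatMap]
  have h1 : (l1.foldl (fun s p => (PySem.List.pyRange (-bound) bound 1).foldl (fun s y =>
        p.2.foldl (fun s n => pvBodyB min_y max_y p.1 y s n) s) s) s)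
      = l1.foldl (fun s p => ((PySem.List.pyRange (-bound) bound 1).flatMap (fun y =>
          (p.2.filter (fun n => decide (min_y ≤ pvLoc y n ∧ pvLoc y n ≤ max_y))).map
            (fun n => (p.1, y, n)))).foldl pvUpd s) s := by
    apply PySem.List.foldl_congr_mem
    intro s p _
    exact pvItemB_eq min_y max_y bound p s
  rw [h1]
  apply PySem.List.foldl_congr_mem
  intro s p _
  exact pvItemB_while_eq min_y max_y bound p s

-- characterisation of the pvUpd-fold, and order-independence --------------------------

theorem pvUpd_char (E : List (Int × Int × Int)) (s) :
    E.foldl pvUpd s = ((E.map (fun e => pvHeight e.2.1 e.2.2)).foldl max s.1,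
      PySem.Set.update s.2 (E.map (fun e => (e.1, e.2.1)))) := by
  induction E generalizing s with
  | nil => simp [PySem.Set.update_nil]
  | cons e E ih =>
    simp only [List.foldl_cons, List.map_cons, PySem.Set.update_cons]
    rw [ih]
    rfl

set_option maxHeartbeats 1000000 in
theorem pvMain (m M b : Int) (l1 l2 : List (Int × List Int)) :
    ((fun s2 => ((s2.1, ((PySem.Dict.keys s2.2).length : Int)) : Int × Int))
      (l2.foldl (fun s p => (PySem.List.pyRange (-b) b 1).foldl (fun s y =>
          pvWhileA m M p.1 y (pvFuel m y (PySem.List.pyGetD p.2 0 0))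
            (PySem.List.pyGetD p.2 0 0) M s) s)
        ((PySem.List.sorted l1 (fun x => (x.2.length : Int)) true).foldl (fun s p =>
          (PySem.List.pyRange (-b) b 1).foldl (fun s y =>
            p.2.foldl (fun s n => pvBodyA m M p.1 y s n) s) s) (0, PySem.Dict.empty))))
    = (((pvEvents m M b l1 l2).map (fun e => pvHeight e.2.1 e.2.2)).foldl max 0,
       ((PySem.Set.ofList ((pvEvents m M b l1 l2).map (fun e => (e.1, e.2.1)))).length : Int)) := by
  have hstep1 : ∀ s t (p : Int × List Int), pvRel s t →
      pvRel ((PySem.List.pyRange (-b) b 1).foldl (fun s y =>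
          p.2.foldl (fun s n => pvBodyA m M p.1 y s n) s) s)
        ((PySem.List.pyRange (-b) b 1).foldl (fun s y =>
          p.2.foldl (fun s n => pvBodyB m M p.1 y s n) s) t) := by
    intro s t p h
    refine pvRel_foldl pvRel _ _ (fun s t y h => ?_) _ s t h
    exact pvRel_foldl pvRel _ _ (fun s t n h => pvRel_body m M p.1 y n s t h) _ s t h
  have hstep2 : ∀ s t (p : Int × List Int), pvRel s t →
      pvRel ((PySem.List.pyRange (-b) b 1).foldl (fun s y =>
          pvWhileA m M p.1 y (pvFuel m y (PySem.List.pyGetD p.2 0 0))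
            (PySem.List.pyGetD p.2 0 0) M s) s)
        ((PySem.List.pyRange (-b) b 1).foldl (fun s y =>
          pvWhileB m M p.1 y (pvFuel m y (PySem.List.pyGetD p.2 0 0))
            (PySem.List.pyGetD p.2 0 0) M s) t) := by
    intro s t p h
    exact pvRel_foldl pvRel _ _ (fun s t y h =>
      pvRel_while m M p.1 y (pvFuel m y (PySem.List.pyGetD p.2 0 0)) _ _ s t h) _ s t h
  have hinit : pvRel (0, PySem.Dict.empty) ((0 : Int), (PySem.Set.empty : PySem.Set (Int × Int))) := by
    refine ⟨rfl, fun k => ?_, ?_, ?_⟩ <;> simp [PySem.Dict.keys, PySem.Dict.empty, PySem.Set.empty]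
  have hrel := pvRel_foldl pvRel _ _ hstep2 l2 _ _
    (pvRel_foldl pvRel _ _ hstep1 (PySem.List.sorted l1 (fun x => (x.2.length : Int)) true)
      _ _ hinit)
  rw [pvStateful_eq m M b (PySem.List.sorted l1 (fun x => (x.2.length : Int)) true) l2,
      pvUpd_char] at hrel
  obtain ⟨ha, hmem, hnd1, hnd2⟩ := hrel
  have hperm : (pvEvents m M b (PySem.List.sorted l1 (fun x => (x.2.length : Int)) true) l2).Perm
      (pvEvents m M b l1 l2) := by
    unfold pvEvents
    exact List.Perm.append_right _
      (List.Perm.flatMap_right _ (PySem.List.sorted_perm l1 (fun x => (x.2.length : Int)) true))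
  refine Prod.ext ?_ ?_
  · rw [ha]
    exact List.Perm.foldl_op_eq (hperm.map _)
  · have hofList : (PySem.Set.ofList ((pvEvents m M b l1 l2).map (fun e => (e.1, e.2.1))))
        = PySem.Set.update PySem.Set.empty ((pvEvents m M b l1 l2).map (fun e => (e.1, e.2.1))) := rfl
    show ((PySem.Dict.keys _).length : Int) = _
    rw [hofList]
    have hmem2 : ∀ k, k ∈ PySem.Set.update (PySem.Set.empty : PySem.Set (Int × Int))
        ((pvEvents m M b (PySem.List.sorted l1 (fun x => (x.2.length : Int)) true) l2).map
          (fun e => (e.1, e.2.1)))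
        ↔ k ∈ PySem.Set.update (PySem.Set.empty : PySem.Set (Int × Int))
          ((pvEvents m M b l1 l2).map (fun e => (e.1, e.2.1))) := by
      intro k
      simp only [PySem.Set.mem_update, (hperm.map (fun e => (e.1, e.2.1))).mem_iff]
    have hndB : (PySem.Set.update (PySem.Set.empty : PySem.Set (Int × Int))
        ((pvEvents m M b l1 l2).map (fun e => (e.1, e.2.1)))).Nodup :=
      PySem.Set.nodup_update _ _ (by simp [PySem.Set.empty])
    have hkeysperm := (List.perm_ext_iff_of_nodup hnd1 hndB).mpr
      (fun k => (hmem k).trans (hmem2 k))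
    exact congrArg _ hkeysperm.length_eq

-- ===== VERDICT (by name: the statement is the Claim_ definition above) =====
theorem find_y_velocities_spec : Claim_equal_find_y_velocities := by
  intro x_velocities target1 target2 _ _
  show find_y_velocities x_velocities target1 target2
      = find_y_velocities_alt x_velocities target1 target2
  exact pvMain target1.2 target2.2 (max |target2.2| |target1.2|) x_velocities.1 x_velocities.2
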